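-- pv_equiv track=rewrite | github.com/jeeveesee/Bioinformatics | BI2/Wk4/XX_JIC_Wk4_6_Leaderboard_Cyclopeptide_Sequencing_Extended.py | spectrum_score
-- ===== SOURCE A (Python) =====
-- from collections import Counter
--
-- def spectrum_score(theoretical_spectrum: list[int], experimental_spectrum: list[int]) -> int:
--     """
--     Compute the  score of a peptide represented as list of amino-acid masses (can be linear or cyclical)
--
--     Parameters:
--         theoretical_spectrum -> list of integer representing theoretical spectrum masses (e.g. [113,128,186])
--         experimental_spectrum -> list of integers representing experimental spectrum
--
--     Returns:
--         integer score (counts multiplicities)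
--     """
--     theo_count = Counter(theoretical_spectrum)
--     exper_count = Counter(experimental_spectrum)
--     score = 0
--     for mass in theo_count:
--         if mass in exper_count:
--             score += min(theo_count[mass], exper_count[mass])
--     return score
-- ===== SOURCE B (Python) =====
-- def spectrum_score(theoretical_spectrum: list[int], experimental_spectrum: list[int]) -> int:
--     ts = sorted(theoretical_spectrum)
--     es = sorted(experimental_spectrum)
--     i = j = score = 0
--     while i < len(ts) and j < len(es):
--         if ts[i] == es[j]:
--             score += 1
--             i += 1
--             j += 1
--         elif ts[i] < es[j]:
--             i += 1
--         else:
--             j += 1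
--     return score
-- ===== Notes on version B (the rewrite author's own statement) =====
-- stated objective: alternative
-- what changed: Replaced the two Counter frequency maps and the key-iteration sum of min-multiplicities by sorting copies of both spectra and counting shared masses with a single two-pointer merge.
import Mathlib
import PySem

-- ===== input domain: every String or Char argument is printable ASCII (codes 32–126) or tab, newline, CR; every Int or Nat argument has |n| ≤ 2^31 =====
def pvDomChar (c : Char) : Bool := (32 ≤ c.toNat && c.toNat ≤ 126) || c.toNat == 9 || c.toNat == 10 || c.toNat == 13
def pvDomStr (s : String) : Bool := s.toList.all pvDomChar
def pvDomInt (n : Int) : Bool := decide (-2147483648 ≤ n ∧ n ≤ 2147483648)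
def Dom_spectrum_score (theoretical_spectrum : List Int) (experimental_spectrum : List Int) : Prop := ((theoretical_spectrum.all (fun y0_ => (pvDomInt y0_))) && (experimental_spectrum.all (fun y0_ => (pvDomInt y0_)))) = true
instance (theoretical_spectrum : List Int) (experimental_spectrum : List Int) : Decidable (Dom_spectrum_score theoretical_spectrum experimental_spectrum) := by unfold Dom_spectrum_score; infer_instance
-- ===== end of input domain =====

-- B replaces A's two Counter maps by a two-pointer merge of sorted copies (alternative algorithm, same result).

-- ===== PORT A =====
def spectrum_score (theoretical_spectrum : List Int) (experimental_spectrum : List Int) : Int :=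
  let theo_count := PySem.Dict.counter theoretical_spectrum
  let exper_count := PySem.Dict.counter experimental_spectrum
  theo_count.keys.foldl
    (fun score mass =>
      if exper_count.contains mass then
        score + min (theo_count.getD mass 0) (exper_count.getD mass 0)
      else score) 0

-- ===== PORT B =====
-- the while loop of Source B: advancing a pointer = consuming the head of the sorted list
def pvMerge : List Int → List Int → Int
  | x :: xs, y :: ys =>
    if x = y then pvMerge xs ys + 1
    else if x < y then pvMerge xs (y :: ys)
    else pvMerge (x :: xs) ys
  | _, _ => 0
termination_by xs ys => xs.length + ys.length

def spectrum_score_alt (theoretical_spectrum : List Int) (experimental_spectrum : List Int) : Int :=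
  pvMerge (PySem.List.sorted theoretical_spectrum (fun x => x) false)
          (PySem.List.sorted experimental_spectrum (fun x => x) false)

-- ===== PRECONDITION & SPEC =====
def Spec_spectrum_score (theoretical_spectrum : List Int) (experimental_spectrum : List Int) (out : Int) : Prop := out = spectrum_score_alt theoretical_spectrum experimental_spectrum
instance (theoretical_spectrum : List Int) (experimental_spectrum : List Int) (out : Int) : Decidable (Spec_spectrum_score theoretical_spectrum experimental_spectrum out) := by unfold Spec_spectrum_score; infer_instance

-- ===== CLAIM (what is proved, stated in full; the proofs are below) =====
def Claim_equal_spectrum_score : Prop := ∀ (theoretical_spectrum : List Int) (experimental_spectrum : List Int), Dom_spectrum_score theoretical_spectrum experimental_spectrum → Spec_spectrum_score theoretical_spectrum experimental_spectrum (spectrum_score theoretical_spectrum experimental_spectrum)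

-- ===== LEMMAS AND PROOFS =====

-- a head absent from the other side contributes nothing
lemma inter_cons_left_notmem (x : Int) (s : Multiset Int) (u : Multiset Int)
    (h : x ∉ u) : (x ::ₘ s) ∩ u = s ∩ u := by
  ext a
  simp only [Multiset.count_inter, Multiset.count_cons]
  have h0 := Multiset.count_eq_zero_of_notMem h
  split_ifs with hax
  · subst hax; omega
  · omega

lemma inter_cons_right_notmem (x : Int) (s : Multiset Int) (u : Multiset Int)
    (h : x ∉ s) : s ∩ (x ::ₘ u) = s ∩ u := by
  ext a
  simp only [Multiset.count_inter, Multiset.count_cons]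
  have h0 := Multiset.count_eq_zero_of_notMem h
  split_ifs with hax
  · subst hax; omega
  · omega

-- the two-pointer merge on sorted lists counts the multiset intersection
lemma pvMerge_eq_card_inter :
    ∀ (xs ys : List Int), xs.Pairwise (· ≤ ·) → ys.Pairwise (· ≤ ·) →
      pvMerge xs ys = (((xs : Multiset Int)) ∩ (ys : Multiset Int)).card
  | [], ys, _, _ => by simp [pvMerge]
  | x :: xs, [], _, _ => by simp [pvMerge]
  | x :: xs, y :: ys, hx, hy => by
    rw [pvMerge]
    by_cases hxy : x = y
    · subst hxy
      rw [if_pos rfl,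
        pvMerge_eq_card_inter xs ys hx.of_cons hy.of_cons]
      have : ((x :: xs : List Int) : Multiset Int) ∩ ((x :: ys : List Int) : Multiset Int)
          = x ::ₘ (((xs : Multiset Int)) ∩ (ys : Multiset Int)) := by
        simp
      rw [this, Multiset.card_cons]
      push_cast; ring
    · rw [if_neg hxy]
      by_cases hlt : x < y
      · rw [if_pos hlt, pvMerge_eq_card_inter xs (y :: ys) hx.of_cons hy]
        have hnm : x ∉ ((y :: ys : List Int) : Multiset Int) := by
          simp only [Multiset.mem_coe, List.mem_cons]
          rintro (rfl | hm)
          · exact hxy rfl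
          · exact absurd (lt_of_lt_of_le hlt ((List.pairwise_cons.mp hy).1 _ hm)) (lt_irrefl x)
        rw [show ((x :: xs : List Int) : Multiset Int) = x ::ₘ (xs : Multiset Int) by simp,
          inter_cons_left_notmem x _ _ hnm]
      · rw [if_neg hlt, pvMerge_eq_card_inter (x :: xs) ys hx hy.of_cons]
        have hyx : y < x := lt_of_le_of_ne (not_lt.mp hlt) (Ne.symm hxy)
        have hnm : y ∉ ((x :: xs : List Int) : Multiset Int) := by
          simp only [Multiset.mem_coe, List.mem_cons]
          rintro (rfl | hm)
          · exact hxy rfl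
          · exact absurd (lt_of_lt_of_le hyx ((List.pairwise_cons.mp hx).1 _ hm)) (lt_irrefl y)
        rw [show ((y :: ys : List Int) : Multiset Int) = y ::ₘ (ys : Multiset Int) by simp,
          inter_cons_right_notmem y _ _ hnm]
termination_by xs ys => xs.length + ys.length

-- B equals the cardinality of the multiset intersection of the two spectra
lemma alt_eq_card_inter (t e : List Int) :
    spectrum_score_alt t e = (((t : Multiset Int)) ∩ (e : Multiset Int)).card := by
  unfold spectrum_score_alt
  have ht : (PySem.List.sorted t (fun x => x) false).Pairwise (· ≤ ·) :=
    PySem.List.sorted_pairwise t (fun x => x)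
  have he : (PySem.List.sorted e (fun x => x) false).Pairwise (· ≤ ·) :=
    PySem.List.sorted_pairwise e (fun x => x)
  rw [pvMerge_eq_card_inter _ _ ht he,
    Multiset.coe_eq_coe.mpr (PySem.List.sorted_perm t (fun x => x) false),
    Multiset.coe_eq_coe.mpr (PySem.List.sorted_perm e (fun x => x) false)]

-- A's loop as a sum over the distinct theoretical masses
lemma a_eq_sum (t e : List Int) :
    spectrum_score t e =
      ((PySem.List.dedup t).map
        (fun m => ((min (t.count m) (e.count m) : Nat) : Int))).sum := by
  unfold spectrum_score
  simp only
  rw [show (PySem.Dict.counter t).keys = PySem.List.dedup t by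
        simp [PySem.Dict.keys_counter]]
  have hbody : (fun (score : Int) (mass : Int) =>
      if (PySem.Dict.counter e).contains mass then
        score + min ((PySem.Dict.counter t).getD mass 0) ((PySem.Dict.counter e).getD mass 0)
      else score)
      = fun score mass => score +
        (if (PySem.Dict.counter e).contains mass then
          min ((PySem.Dict.counter t).getD mass 0) ((PySem.Dict.counter e).getD mass 0)
        else 0) := by
    funext s m; split_ifs <;> simp
  rw [hbody, PySem.List.foldl_add, zero_add]
  congr 1
  apply List.map_congr_left
  intro m hm
  have hmt : m ∈ t := (PySem.List.mem_dedup _ _).mp hm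
  by_cases hme : m ∈ e
  · simp [PySem.Dict.contains_counter, hme, PySem.Dict.getD_counter]
  · have hc : e.count m = 0 := List.count_eq_zero.mpr hme
    simp [PySem.Dict.contains_counter, hme, hc]

-- the min-multiplicity sum over distinct masses of t is the intersection cardinality
lemma sum_eq_card_inter (t e : List Int) :
    ((PySem.List.dedup t).map
      (fun m => ((min (t.count m) (e.count m) : Nat) : Int))).sum =
    (((t : Multiset Int)) ∩ (e : Multiset Int)).card := by
  have hnd : (PySem.List.dedup t).Nodup := PySem.List.nodup_dedup t
  -- list sum over the nodup dedup list as a Finset sum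
  have h1 : ((PySem.List.dedup t).map
      (fun m => ((min (t.count m) (e.count m) : Nat) : Int))).sum
      = ∑ m ∈ (PySem.List.dedup t).toFinset,
          ((min (t.count m) (e.count m) : Nat) : Int) := by
    rw [List.sum_toFinset _ hnd]
  rw [h1]
  have h2 : ∀ m : Int, ((min (t.count m) (e.count m) : Nat) : Int)
      = (((((t : Multiset Int)) ∩ (e : Multiset Int)).count m : Nat) : Int) := by
    intro m
    rw [Multiset.count_inter]
    simp [Multiset.coe_count]
  simp only [h2]
  rw [← Nat.cast_sum]
  congr 1
  -- sum of counts over a superset of the support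
  rw [← Multiset.toFinset_sum_count_eq (((t : Multiset Int)) ∩ (e : Multiset Int))]
  refine (Finset.sum_subset ?_ ?_).symm
  · intro m hm
    have hmem : m ∈ ((t : Multiset Int)) ∩ (e : Multiset Int) := by simpa using hm
    have hmt : m ∈ t := (Multiset.mem_inter.mp hmem).1
    simp [hmt]
  · intro m _ hm
    have : m ∉ ((t : Multiset Int)) ∩ (e : Multiset Int) := by
      simpa using hm
    exact Multiset.count_eq_zero_of_notMem this

-- ===== VERDICT (by name: the statement is the Claim_ definition above) =====
theorem spectrum_score_spec : Claim_equal_spectrum_score := by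
  intro t e _
  unfold Spec_spectrum_score
  rw [a_eq_sum, sum_eq_card_inter, alt_eq_card_inter]
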